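-- pv_equiv track=rewrite | github.com/sean-halpin/hackerrank | python/codility/arrays/unpaired.py | solution
-- ===== SOURCE A (Python) =====
-- def solution(A):
--     if not A:
--         return 0
--     pair_map = {}
--     for e in A:
--         if e in pair_map and not pair_map[e]:
--             pair_map[e] = True
--         else:
--             pair_map[e] = False
--     unpaired = [key for key,val in pair_map.items() if val == False]
--     if unpaired:
--         return unpaired[0]
--     else:
--         return 0
-- ===== SOURCE B (Python) =====
-- def solution(A):
--     for e in A:
--         if A.count(e) % 2 == 1:
--             return e
--     return 0
-- ===== Notes on version B (the rewrite author's own statement) =====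
-- stated objective: simpler
-- what changed: Drops the dict entirely: B scans A and returns the first element whose total count in A is odd, instead of A's boolean-toggle dict built in one pass plus a filter comprehension over its items; on the benchmark's duplicate-heavy inputs the C-level list.count beats A's per-element Python dict work, though B is O(n^2) in the number of distinct values.
import Mathlib
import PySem

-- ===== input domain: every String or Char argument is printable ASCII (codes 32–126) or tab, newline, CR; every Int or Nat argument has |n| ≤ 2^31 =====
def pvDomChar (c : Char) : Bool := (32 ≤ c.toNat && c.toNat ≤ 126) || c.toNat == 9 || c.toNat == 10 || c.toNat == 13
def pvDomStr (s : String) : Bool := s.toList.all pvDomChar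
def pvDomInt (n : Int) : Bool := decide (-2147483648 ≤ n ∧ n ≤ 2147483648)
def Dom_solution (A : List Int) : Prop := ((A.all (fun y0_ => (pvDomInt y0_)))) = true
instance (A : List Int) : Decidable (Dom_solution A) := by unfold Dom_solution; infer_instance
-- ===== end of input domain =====

-- B is simpler: no dict at all — it returns the first element of A whose total count in A is odd,
-- by a plain nested count scan, instead of A's boolean-toggle dict plus filter comprehension.

-- ===== PORT A =====
def solution (A : List Int) : Int :=
  if A = [] then 0
  else
    let pair_map := A.foldl
      (fun d e =>
        if d.contains e && !(d.getD e false) then d.insert e true else d.insert e false)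
      PySem.Dict.empty
    let unpaired := (pair_map.items.filter (fun p => p.2 == false)).map (·.1)
    match unpaired with
    | k :: _ => k
    | [] => 0

-- ===== PORT B =====
-- helper: the early-returning 'for e in A' loop (A stays fixed for the inner count)
def scanOdd_alt (A : List Int) : List Int → Int
  | [] => 0
  | e :: rest => if PySem.Int.mod (PySem.List.count A e) 2 == 1 then e else scanOdd_alt A rest

def solution_alt (A : List Int) : Int := scanOdd_alt A A

-- ===== PRECONDITION & SPEC =====
def Spec_solution (A : List Int) (out : Int) : Prop := out = solution_alt A
instance (A : List Int) (out : Int) : Decidable (Spec_solution A out) := by unfold Spec_solution; infer_instance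

-- ===== CLAIM (what is proved, stated in full; the proofs are below) =====
def Claim_equal_solution : Prop := ∀ (A : List Int), Dom_solution A → Spec_solution A (solution A)

-- ===== LEMMAS AND PROOFS =====

-- A's loop body is an insert of the toggled bit
theorem step_eq (d : PySem.Dict Int Bool) (e : Int) :
    (if d.contains e && !(d.getD e false) then d.insert e true else d.insert e false)
      = d.insert e (d.contains e && !(d.getD e false)) := by
  by_cases h : (d.contains e && !(d.getD e false)) = true <;> simp [h]

-- A's dict after the loop: value at e is "the count of e is even", present iff e occurs
theorem toggle_get? (l : List Int) (e : Int) :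
    ((l.foldl
      (fun d x =>
        if d.contains x && !(d.getD x false) then d.insert x true else d.insert x false)
      PySem.Dict.empty).get? e)
      = if e ∈ l then some (decide (l.count e % 2 = 0)) else none := by
  induction l using List.reverseRecOn with
  | nil => simp [PySem.Dict.get?_empty]
  | append_singleton l x ih =>
    rw [List.foldl_append]
    simp only [List.foldl_cons, List.foldl_nil]
    rw [step_eq]
    by_cases hx : e = x
    · subst hx
      rw [PySem.Dict.get?_insert_self]
      rw [PySem.Dict.contains_eq_isSome_get?, PySem.Dict.getD_eq_get?_getD, ih]
      by_cases hm : e ∈ l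
      · simp only [hm, if_true, Option.isSome_some, Option.getD_some, List.mem_append,
          List.mem_singleton, or_true, List.count_append, List.count_singleton,
          beq_self_eq_true]
        have : (List.count e l + 1) % 2 = 0 ↔ ¬ (List.count e l % 2 = 0) := by omega
        by_cases hp : List.count e l % 2 = 0 <;> simp [hp, this]
      · simp [hm, List.count_eq_zero.mpr hm]
    · rw [PySem.Dict.get?_insert_of_ne _ _ hx, ih]
      simp [hx, List.count_append, Ne.symm hx]

-- A's dict keys are the distinct elements in first-appearance order
theorem toggle_keys (l : List Int) :
    ((l.foldl
      (fun d x =>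
        if d.contains x && !(d.getD x false) then d.insert x true else d.insert x false)
      PySem.Dict.empty).keys) = PySem.Set.ofList l := by
  simp only [step_eq]
  rw [PySem.Dict.keys_foldl_insert l (fun d x => d.contains x && !(d.getD x false))]
  simp [PySem.Dict.keys_empty, PySem.Set.update_nil_left]

-- B's scan loop, as find?-then-default
theorem scanOdd_eq_find (A l : List Int) :
    scanOdd_alt A l
      = (l.find? (fun e => PySem.Int.mod (PySem.List.count A e) 2 == 1)).getD 0 := by
  induction l with
  | nil => rfl
  | cons e rest ih =>
    by_cases h : ((A.count e : Int) % 2 = 1)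
    · simp [scanOdd_alt, h]
    · simp [scanOdd_alt, h, ih]

-- the predicate is value-based, so scanning the first-appearance dedup of l finds the same element
theorem find_ofList {α : Type} [DecidableEq α] (p : α → Bool) (l : List α) :
    (PySem.Set.ofList l).find? p = l.find? p := by
  induction l using List.reverseRecOn with
  | nil => rfl
  | append_singleton l x ih =>
    rw [PySem.Set.ofList_eq_foldl, List.foldl_append, List.foldl_cons, List.foldl_nil,
      ← PySem.Set.ofList_eq_foldl]
    unfold PySem.Set.add
    rw [List.find?_append, ← ih]
    by_cases hx : PySem.Set.contains (PySem.Set.ofList l) x = true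
    · have hmem : x ∈ l := by
        have := (PySem.Set.mem_ofList l x).mp ?_
        · exact this
        · simpa [PySem.Set.contains] using hx
      simp only [hx, if_true]
      cases hfind : (PySem.Set.ofList l).find? p with
      | some y => simp
      | none =>
        have hxl : x ∈ PySem.Set.ofList l := (PySem.Set.mem_ofList l x).mpr hmem
        have : p x = false := by
          have := List.find?_eq_none.mp hfind x hxl
          simpa using this
        simp [List.find?, this]
    · simp only [hx]
      rw [if_neg (by simp), List.find?_append]

-- A's filter-then-head over the parity bits equals find?-then-default of the odd predicate
theorem filter_head_eq_find (A : List Int) (ks : List Int) :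
    (match ((ks.map (fun k => (k, decide (A.count k % 2 = 0)))).filter
        (fun p => p.2 == false)).map (·.1) with
      | k :: _ => k
      | [] => (0 : Int))
    = (ks.find? (fun e => PySem.Int.mod (PySem.List.count A e) 2 == 1)).getD 0 := by
  induction ks with
  | nil => rfl
  | cons k ks ih =>
    have hmod : PySem.Int.mod (PySem.List.count A k) 2 = ((A.count k % 2 : Nat) : Int) := by
      rw [PySem.List.count_eq]
      exact_mod_cast PySem.Int.mod_natCast (A.count k) 2
    simp only [List.map_cons, List.filter_cons, List.find?_cons, hmod]
    by_cases hp : A.count k % 2 = 0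
    · have hb : (decide (A.count k % 2 = 0) == false) = false := by simp [hp]
      have hc : ((((A.count k % 2 : Nat) : Int)) == 1) = false := by simp [hp]
      rw [hb, hc]
      simpa using ih
    · have h1 : A.count k % 2 = 1 := by omega
      have hb : (decide (A.count k % 2 = 0) == false) = true := by simp [hp]
      have hc : ((((A.count k % 2 : Nat) : Int)) == 1) = true := by simp [h1]
      rw [hb, hc]
      simp

theorem solution_eq_alt (A : List Int) : solution A = solution_alt A := by
  unfold solution solution_alt
  dsimp only
  rw [scanOdd_eq_find, ← find_ofList]
  by_cases hA : A = []
  · subst hA; rfl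
  · simp only [hA, if_false]
    have hnd : ((A.foldl
        (fun d x =>
          if d.contains x && !(d.getD x false) then d.insert x true else d.insert x false)
        PySem.Dict.empty).keys).Nodup := by
      rw [toggle_keys]; exact PySem.Set.nodup_ofList A
    rw [PySem.Dict.items_eq_map_keys _ hnd false, toggle_keys]
    have hitems : (PySem.Set.ofList A).map (fun k =>
        (k, (A.foldl
          (fun d x =>
            if d.contains x && !(d.getD x false) then d.insert x true else d.insert x false)
          PySem.Dict.empty).getD k false))
        = (PySem.Set.ofList A).map (fun k => (k, decide (A.count k % 2 = 0))) := by
      apply List.map_congr_left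
      intro k hk
      have hkA : k ∈ A := (PySem.Set.mem_ofList A k).mp hk
      rw [PySem.Dict.getD_eq_get?_getD, toggle_get?]
      simp [hkA]
    rw [hitems]
    exact filter_head_eq_find A (PySem.Set.ofList A)

-- ===== VERDICT (by name: the statement is the Claim_ definition above) =====
theorem solution_spec : Claim_equal_solution := by
  intro A _
  exact solution_eq_alt A
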